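-- pv_equiv track=rewrite | github.com/upneja/influenza | signals/delphi_epidata.py | _epiweek_range
-- ===== SOURCE A (Python) =====
-- def _epiweek_range(start: int, end: int) -> list[int]:
--     """Generate a list of epiweeks from start to end (inclusive).
--
--     Handles the year boundary correctly — CDC epiweeks go up to 52 or 53
--     then wrap to 01 of the next year.
--     """
--     weeks: list[int] = []
--     year = start // 100
--     week = start % 100
--
--     end_year = end // 100
--     end_week = end % 100
--
--     while (year, week) <= (end_year, end_week):
--         weeks.append(year * 100 + week)
--         week += 1
--         # CDC weeks: most years have 52, some have 53.
--         # Use 53 as the upper bound; the API will simply return no data for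
--         # non-existent week 53.
--         if week > 53:
--             week = 1
--             year += 1
--
--     return weeks
-- ===== SOURCE B (Python) =====
-- def _epiweek_range(start: int, end: int) -> list[int]:
--     """Generate the list of epiweeks from start to end (inclusive), one year at a time."""
--     start_year, start_week = divmod(start, 100)
--     end_year, end_week = divmod(end, 100)
--     weeks: list[int] = []
--     for year in range(start_year, end_year + 1):
--         first = start_week if year == start_year else 1
--         # an epiweek year has at most 53 weeks
--         last = min(end_week, 53) if year == end_year else 53
--         weeks.extend(range(year * 100 + first, year * 100 + last + 1))
--     return weeks
-- ===== Notes on version B (the rewrite author's own statement) =====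
-- stated objective: alternative
-- what changed: A's flat while-loop that steps week by week with a wrap check is replaced by a year-by-year decomposition: an outer loop over the years extends the result with one whole range of week codes (weeks capped at 53) per year.
-- intended difference: On inputs whose start week part exceeds 53 and is not past the end, A emits the malformed code start itself before wrapping to the next year, while B emits only the existing weeks 1..53 and so omits it; B's value is intended since epiweeks beyond 53 do not exist. — e.g. on _epiweek_range(200060, 200102): A returns [200060, 200101, 200102], B returns [200101, 200102]
import Mathlib
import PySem

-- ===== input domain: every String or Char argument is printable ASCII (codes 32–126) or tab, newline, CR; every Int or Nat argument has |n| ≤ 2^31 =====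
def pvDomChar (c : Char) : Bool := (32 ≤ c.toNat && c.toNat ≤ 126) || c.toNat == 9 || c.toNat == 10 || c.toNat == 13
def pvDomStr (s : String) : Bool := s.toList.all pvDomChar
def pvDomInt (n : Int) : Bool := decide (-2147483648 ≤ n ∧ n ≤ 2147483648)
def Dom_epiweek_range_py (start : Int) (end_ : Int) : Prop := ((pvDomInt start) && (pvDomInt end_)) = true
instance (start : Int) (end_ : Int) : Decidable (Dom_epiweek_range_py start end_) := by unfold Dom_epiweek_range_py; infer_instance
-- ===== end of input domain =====

-- B replaces A's flat week-by-week wrap-accumulator while-loop by a year-by-year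
-- decomposition that extends one whole range of week codes per year; on starts whose
-- week part exceeds 53 (a malformed epiweek) A emits that code once, B omits it (see D_).

-- ===== PORT A =====
-- the while-loop of A: state (year, week), loops while (year, week) <= (end_year, end_week)
-- lexicographically; the Nat fuel only makes the loop total (it strictly exceeds the number
-- of iterations left, see pvLoopA_eq below) and changes no computed value
def pvFuel (ey y w : Int) : Nat := (ey + 1 - y).toNat * 200 + (100 - w).toNat

def pvLoopAF : Nat → Int → Int → Int → Int → List Int
  | 0, _, _, _, _ => []
  | Nat.succ fuel, ey, ew, y, w =>
    if y < ey ∨ (y = ey ∧ w ≤ ew) then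
      (y * 100 + w) ::
        (if w + 1 > 53 then pvLoopAF fuel ey ew (y + 1) 1 else pvLoopAF fuel ey ew y (w + 1))
    else []

def pvLoopA (ey ew y w : Int) : List Int := pvLoopAF (pvFuel ey y w) ey ew y w

def epiweek_range_py (start : Int) (end_ : Int) : List Int :=
  let year := PySem.Int.floordiv start 100
  let week := PySem.Int.mod start 100
  let end_year := PySem.Int.floordiv end_ 100
  let end_week := PySem.Int.mod end_ 100
  pvLoopA end_year end_week year week

-- ===== PORT B =====
def epiweek_range_py_alt (start : Int) (end_ : Int) : List Int :=
  let sy := PySem.Int.floordiv start 100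
  let sw := PySem.Int.mod start 100
  let ey := PySem.Int.floordiv end_ 100
  let ew := PySem.Int.mod end_ 100
  (PySem.List.pyRange sy (ey + 1) 1).foldl (fun weeks y =>
    let first := if y = sy then sw else 1
    let last := if y = ey then min ew 53 else 53
    weeks ++ PySem.List.pyRange (y * 100 + first) (y * 100 + last + 1) 1) []

-- ===== PRECONDITION & SPEC =====
-- On starts whose week part is malformed (> 53) and not past the end, A emits the
-- malformed code start itself before wrapping to week 1 of the next year, while B,
-- which only ever emits weeks up to 53, starts directly at the next year's week 1 —
-- the intended value, since epiweeks beyond 53 do not exist.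
def D_epiweek_range_py (start : Int) (end_ : Int) : Prop :=
  53 < PySem.Int.mod start 100 ∧
    (PySem.Int.floordiv start 100 < PySem.Int.floordiv end_ 100 ∨
     (PySem.Int.floordiv start 100 = PySem.Int.floordiv end_ 100 ∧
      PySem.Int.mod start 100 ≤ PySem.Int.mod end_ 100))
instance (start : Int) (end_ : Int) : Decidable (D_epiweek_range_py start end_) := by
  unfold D_epiweek_range_py; infer_instance

def Spec_epiweek_range_py (start : Int) (end_ : Int) (out : List Int) : Prop :=
  ¬ D_epiweek_range_py start end_ → out = epiweek_range_py_alt start end_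
instance (start : Int) (end_ : Int) (out : List Int) : Decidable (Spec_epiweek_range_py start end_ out) := by unfold Spec_epiweek_range_py; infer_instance

def pvDiffWitness_epiweek_range_py : Int × Int := (200060, 200102)
def pvDiffWitnessOut_epiweek_range_py : (List Int) × (List Int) :=
  ([200060, 200101, 200102], [200101, 200102])

-- ===== CLAIM (what is proved, stated in full; the proofs are below) =====
def Claim_unchanged_epiweek_range_py : Prop := ∀ (start : Int) (end_ : Int), Dom_epiweek_range_py start end_ → Spec_epiweek_range_py start end_ (epiweek_range_py start end_)
def Claim_changed_epiweek_range_py : Prop := Dom_epiweek_range_py (pvDiffWitness_epiweek_range_py.1) (pvDiffWitness_epiweek_range_py.2) ∧ D_epiweek_range_py (pvDiffWitness_epiweek_range_py.1) (pvDiffWitness_epiweek_range_py.2) ∧ epiweek_range_py (pvDiffWitness_epiweek_range_py.1) (pvDiffWitness_epiweek_range_py.2) = pvDiffWitnessOut_epiweek_range_py.1 ∧ epiweek_range_py_alt (pvDiffWitness_epiweek_range_py.1) (pvDiffWitness_epiweek_range_py.2) = pvDiffWitnessOut_epiweek_range_py.2 ∧ pvDiffWitnessOut_epiweek_range_py.1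 ≠ pvDiffWitnessOut_epiweek_range_py.2
def Claim_exact_epiweek_range_py : Prop := ∀ (start : Int) (end_ : Int), Dom_epiweek_range_py start end_ → D_epiweek_range_py start end_ → epiweek_range_py start end_ ≠ epiweek_range_py_alt start end_

-- ===== LEMMAS AND PROOFS =====

-- any fuel at least the measure computes the same list
theorem pvLoopAF_congr (f1 : Nat) : ∀ (f2 : Nat) (ey ew y w : Int),
    pvFuel ey y w ≤ f1 → pvFuel ey y w ≤ f2 →
    pvLoopAF f1 ey ew y w = pvLoopAF f2 ey ew y w := by
  induction f1 with
  | zero =>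
      intro f2 ey ew y w h1 h2
      have h0 : ¬ (y < ey ∨ (y = ey ∧ w ≤ ew)) := by unfold pvFuel at h1; omega
      cases f2 with
      | zero => rfl
      | succ g => simp only [pvLoopAF, if_neg h0]
  | succ f ih =>
      intro f2 ey ew y w h1 h2
      cases f2 with
      | zero =>
          have h0 : ¬ (y < ey ∨ (y = ey ∧ w ≤ ew)) := by unfold pvFuel at h2; omega
          simp only [pvLoopAF, if_neg h0]
      | succ g =>
          simp only [pvLoopAF]
          by_cases hcond : y < ey ∨ (y = ey ∧ w ≤ ew)
          · rw [if_pos hcond, if_pos hcond]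
            by_cases hwrap : w + 1 > 53
            · rw [if_pos hwrap, if_pos hwrap,
                ih g ey ew (y + 1) 1 (by unfold pvFuel at *; omega) (by unfold pvFuel at *; omega)]
            · rw [if_neg hwrap, if_neg hwrap,
                ih g ey ew y (w + 1) (by unfold pvFuel at *; omega) (by unfold pvFuel at *; omega)]
          · rw [if_neg hcond, if_neg hcond]

-- the one-step unfolding of A's while-loop (the fuel is invisible at this level)
theorem pvLoopA_eq (ey ew y w : Int) :
    pvLoopA ey ew y w =
      if y < ey ∨ (y = ey ∧ w ≤ ew) then
        (y * 100 + w) ::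
          (if w + 1 > 53 then pvLoopA ey ew (y + 1) 1 else pvLoopA ey ew y (w + 1))
      else [] := by
  by_cases hcond : y < ey ∨ (y = ey ∧ w ≤ ew)
  · obtain ⟨f, hfe⟩ : ∃ f, pvFuel ey y w = f + 1 := by
      refine ⟨pvFuel ey y w - 1, ?_⟩
      have : 1 ≤ pvFuel ey y w := by unfold pvFuel; rcases hcond with h | ⟨h, _⟩ <;> omega
      omega
    unfold pvLoopA
    rw [hfe]
    simp only [pvLoopAF]
    rw [if_pos hcond, if_pos hcond]
    by_cases hwrap : w + 1 > 53
    · rw [if_pos hwrap, if_pos hwrap,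
        pvLoopAF_congr f (pvFuel ey (y + 1) 1) ey ew (y + 1) 1
          (by unfold pvFuel at *; omega) le_rfl]
    · rw [if_neg hwrap, if_neg hwrap,
        pvLoopAF_congr f (pvFuel ey y (w + 1)) ey ew y (w + 1)
          (by unfold pvFuel at *; omega) le_rfl]
  · rw [if_neg hcond]
    unfold pvLoopA
    cases hfe : pvFuel ey y w with
    | zero => rfl
    | succ f => simp only [pvLoopAF, if_neg hcond]

-- the per-year chunk B appends, as a function of the (fixed) loop bounds and the first year/week
def pvChunk (ey ew sy sw y : Int) : List Int :=
  let first := if y = sy then sw else 1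
  let last := if y = ey then min ew 53 else 53
  PySem.List.pyRange (y * 100 + first) (y * 100 + last + 1) 1

theorem pvFlatMap_congr_mem {α β : Type} {l : List α} {f g : α → List β}
    (h : ∀ x ∈ l, f x = g x) : l.flatMap f = l.flatMap g := by
  induction l with
  | nil => rfl
  | cons a t ih =>
      simp only [List.flatMap_cons]
      rw [h a (by simp), ih (fun x hx => h x (by simp [hx]))]

-- a year after the first is rendered the same whether the first year/week is (sy, sw) or (sy', 1)
theorem pvChunk_later (ey ew sy sw sy' t : Int) (h1 : t ≠ sy) :
    pvChunk ey ew sy' 1 t = pvChunk ey ew sy sw t := by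
  by_cases ht : t = sy'
  · subst ht
    simp [pvChunk, h1]
  · simp [pvChunk, h1, ht]

-- A's while-loop equals a flatMap of B's per-year chunks, from every state with week ≤ 53
theorem pvLoopA_eq_flatMap (ey ew y w : Int) (hw : w ≤ 53) :
    pvLoopA ey ew y w = (PySem.List.pyRange y (ey + 1) 1).flatMap (pvChunk ey ew y w) := by
  rw [pvLoopA_eq]
  by_cases hcond : y < ey ∨ (y = ey ∧ w ≤ ew)
  · have hy : y ≤ ey := by rcases hcond with h | ⟨h, _⟩ <;> omega
    rw [if_pos hcond, PySem.List.pyRange_one_cons (by omega : y < ey + 1), List.flatMap_cons]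
    by_cases hwrap : w + 1 > 53
    · -- week wraps (w = 53): the year-y chunk is the singleton [y*100+53]
      have hw53 : w = 53 := by omega
      subst hw53
      rw [if_pos hwrap, pvLoopA_eq_flatMap ey ew (y + 1) 1 (by omega)]
      have hchunk : pvChunk ey ew y 53 y = [y * 100 + 53] := by
        by_cases hye : y = ey
        · have hew : (53 : Int) ≤ ew := by
            subst hye; exact (hcond.resolve_left (by omega)).2
          have hmin : min ew 53 = 53 := by omega
          simp [pvChunk, hye, hmin, PySem.List.pyRange_one_singleton]
        · simp [pvChunk, hye, PySem.List.pyRange_one_singleton]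
      rw [hchunk]
      rw [pvFlatMap_congr_mem (g := pvChunk ey ew y 53)
        (fun t ht => pvChunk_later ey ew y 53 (y + 1) t
          (by rw [PySem.List.mem_pyRange_one] at ht; omega))]
      rfl
    · -- no wrap: the year-y chunk starting at w is y*100+w consed on the one starting at w+1
      rw [if_neg hwrap, pvLoopA_eq_flatMap ey ew y (w + 1) (by omega),
        PySem.List.pyRange_one_cons (by omega : y < ey + 1), List.flatMap_cons]
      have hstep : y * 100 + w + 1 = y * 100 + (w + 1) := by ring
      have hcons : pvChunk ey ew y w y = (y * 100 + w) :: pvChunk ey ew y (w + 1) y := by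
        by_cases hye : y = ey
        · have hwew : w ≤ ew := (hcond.resolve_left (by omega)).2
          subst hye
          have hlt : y * 100 + w < y * 100 + min ew 53 + 1 := by omega
          simp only [pvChunk, if_true]
          rw [PySem.List.pyRange_one_cons hlt, hstep]
        · have hlt : y * 100 + w < y * 100 + 53 + 1 := by omega
          simp only [pvChunk, if_neg hye, if_true]
          rw [PySem.List.pyRange_one_cons hlt, hstep]
      rw [hcons]
      rw [pvFlatMap_congr_mem (f := pvChunk ey ew y (w + 1)) (g := pvChunk ey ew y w)
        (fun t ht => by
          have h1 : t ≠ y := by rw [PySem.List.mem_pyRange_one] at ht; omega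
          simp [pvChunk, h1])]
      simp
  · rw [if_neg hcond]
    have h1 : ¬ y < ey := fun h => hcond (Or.inl h)
    by_cases hye : y = ey
    · subst hye
      have hew : ew < w := by
        have := fun hw' => hcond (Or.inr ⟨rfl, hw'⟩); omega
      rw [PySem.List.pyRange_one_cons (by omega), PySem.List.pyRange_one_eq_nil (by omega),
        List.flatMap_cons, List.flatMap_nil, List.append_nil]
      simp only [pvChunk, if_true]
      rw [PySem.List.pyRange_one_eq_nil (by omega)]
    · rw [PySem.List.pyRange_one_eq_nil (by omega)]
      rfl
termination_by ((ey + 1 - y).toNat * 200 + (100 - w).toNat)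
decreasing_by all_goals omega

-- inside D_, A is B with the one malformed start code consed in front
theorem pvLoopA_cons_of_D (start end_ : Int) (hD : D_epiweek_range_py start end_) :
    epiweek_range_py start end_ =
      (PySem.Int.floordiv start 100 * 100 + PySem.Int.mod start 100) ::
        epiweek_range_py_alt start end_ := by
  obtain ⟨hsw, hcond⟩ := hD
  unfold epiweek_range_py epiweek_range_py_alt
  rw [PySem.List.foldl_append_eq_flatMap, List.nil_append]
  set sy := PySem.Int.floordiv start 100 with hsy
  set sw := PySem.Int.mod start 100 with hsw'
  set ey := PySem.Int.floordiv end_ 100 with hey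
  set ew := PySem.Int.mod end_ 100 with hew
  have hy : sy ≤ ey := by rcases hcond with h | ⟨h, _⟩ <;> omega
  rw [pvLoopA_eq, if_pos hcond, if_pos (by omega : sw + 1 > 53)]
  rw [pvLoopA_eq_flatMap ey ew (sy + 1) 1 (by omega)]
  rw [PySem.List.pyRange_one_cons (by omega : sy < ey + 1), List.flatMap_cons]
  rw [pvFlatMap_congr_mem (f := pvChunk ey ew (sy + 1) 1) (g := pvChunk ey ew sy sw)
    (fun t ht => pvChunk_later ey ew sy sw (sy + 1) t
      (by rw [PySem.List.mem_pyRange_one] at ht; omega))]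
  have h53 : (if sy = ey then min ew 53 else 53) ≤ 53 := by split_ifs <;> omega
  have hnil : PySem.List.pyRange (sy * 100 + sw)
      (sy * 100 + (if sy = ey then min ew 53 else 53) + 1) 1 = [] :=
    PySem.List.pyRange_one_eq_nil (by omega)
  rw [if_pos (rfl : sy = sy), hnil, List.nil_append]
  rfl

-- ===== VERDICT (by name: the statements are the Claim_ definitions above) =====
theorem epiweek_range_py_spec : Claim_unchanged_epiweek_range_py := by
  intro start end_ _ hnD
  by_cases hsw : PySem.Int.mod start 100 ≤ 53
  · unfold epiweek_range_py epiweek_range_py_alt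
    rw [PySem.List.foldl_append_eq_flatMap]
    rw [pvLoopA_eq_flatMap _ _ _ _ hsw]
    rfl
  · -- malformed start week outside D_: both sides are empty
    unfold D_epiweek_range_py at hnD
    have hcond : ¬ (PySem.Int.floordiv start 100 < PySem.Int.floordiv end_ 100 ∨
        (PySem.Int.floordiv start 100 = PySem.Int.floordiv end_ 100 ∧
         PySem.Int.mod start 100 ≤ PySem.Int.mod end_ 100)) :=
      fun h => hnD ⟨by omega, h⟩
    unfold epiweek_range_py epiweek_range_py_alt
    rw [PySem.List.foldl_append_eq_flatMap, List.nil_append]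
    rw [pvLoopA_eq, if_neg hcond]
    set sy := PySem.Int.floordiv start 100
    set sw := PySem.Int.mod start 100
    set ey := PySem.Int.floordiv end_ 100
    set ew := PySem.Int.mod end_ 100
    have h1 : ¬ sy < ey := fun h => hcond (Or.inl h)
    by_cases hye : sy = ey
    · have hew : ew < sw := by
        have := fun hw' => hcond (Or.inr ⟨hye, hw'⟩); omega
      rw [PySem.List.pyRange_one_cons (by omega : sy < ey + 1),
        PySem.List.pyRange_one_eq_nil (by omega), List.flatMap_cons, List.flatMap_nil,
        List.append_nil]
      simp only [if_true, hye]
      rw [PySem.List.pyRange_one_eq_nil (by omega)]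
    · rw [PySem.List.pyRange_one_eq_nil (by omega)]
      rfl

theorem epiweek_range_py_changed : Claim_changed_epiweek_range_py := by
  unfold Claim_changed_epiweek_range_py
  decide

theorem epiweek_range_py_tight : Claim_exact_epiweek_range_py := by
  intro start end_ _ hD heq
  have h := pvLoopA_cons_of_D start end_ hD
  rw [heq] at h
  exact (List.cons_ne_self _ _) h.symm
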